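-- pv_equiv track=rewrite | github.com/m0neyy/DES | DES.py | init_perm
-- ===== SOURCE A (Python) =====
-- def byter_to_list(byter, as_byte = True):
--     bits = []
--     bitsfix = []
--     as_bits = []
--     for num in byter: # parse our byte array
--         bits.append(str(bin(num)))
--     for bites in bits: # add zeros the left, fix size of the bits in bytes
--         byte = bites[2:]
--         while len(byte)!=8:
--             zeros = "0"*(8-len(byte))
--             byte = zeros + byte
--         bitsfix.append(byte)
--     if not as_byte:
--         for byte in bitsfix:
--             for bit in byte:
--                 as_bits.append(bit)
--         return as_bits
--     return bitsfix
--
-- def init_perm(byter1): # initial permuattion, takes 8 bytes in a byte array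
--     perm_seq = [58, 50, 42, 34, 26, 18, 10, 2,
--                 60, 52, 44, 36, 28, 20, 12, 4,
--                 62, 54, 46, 38, 30, 22, 14, 6,
--                 64, 56, 48, 40, 32, 24, 16, 8,
--                 57, 49, 41, 33, 25, 17, 9, 1,
--                 59, 51, 43, 35, 27, 19, 11, 3,
--                 61, 53, 45, 37, 29, 21, 13, 5,
--                 63, 55, 47, 39, 31, 23, 15, 7]
--     blocks = []
--     IPbits = []
--     bitsfix = byter_to_list(byter1)
--     # PKCS5 Padding
--     if len(bitsfix)!=8: # <------ probably want to rethink this padding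
--         req_byts = 8 - len(bitsfix)
--         pad = str(bin(req_byts))[2:]
--         if len(pad)!=8:
--             zeros = "0"*(8-len(pad))
--             pad = zeros + pad
--         for i in range(req_byts):
--             bitsfix.append(pad)
--     for byte in bitsfix:
--         for bit in byte:
--             blocks.append(bit)
--     for ind in perm_seq:
--         IPbits.append(blocks[ind-1])
--
--     return IPbits
-- ===== SOURCE B (Python) =====
-- def init_perm(byter1): # initial permutation via one big integer instead of char lists
--     perm_seq = [58, 50, 42, 34, 26, 18, 10, 2,
--                 60, 52, 44, 36, 28, 20, 12, 4,
--                 62, 54, 46, 38, 30, 22, 14, 6,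
--                 64, 56, 48, 40, 32, 24, 16, 8,
--                 57, 49, 41, 33, 25, 17, 9, 1,
--                 59, 51, 43, 35, 27, 19, 11, 3,
--                 61, 53, 45, 37, 29, 21, 13, 5,
--                 63, 55, 47, 39, 31, 23, 15, 7]
--     block = 0
--     nbits = 0
--     for num in byter1:
--         block = block * 256 + num
--         nbits += 8
--     if len(byter1) != 8:
--         req_byts = 8 - len(byter1)
--         for _ in range(req_byts):  # pad byte value equals req_byts (PKCS5-style)
--             block = block * 256 + req_byts
--             nbits += 8
--     return [str((block >> (nbits - ind)) & 1) for ind in perm_seq]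
-- ===== Notes on version B (the rewrite author's own statement) =====
-- stated objective: alternative
-- what changed: B accumulates the bytes (and the PKCS5-style pad bytes) into one big integer with a bit counter and extracts each permuted bit by shift-and-mask arithmetic, instead of A's route through bin() strings, a zero-padding while loop, a flattened list of one-character strings and list indexing.
import Mathlib
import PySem

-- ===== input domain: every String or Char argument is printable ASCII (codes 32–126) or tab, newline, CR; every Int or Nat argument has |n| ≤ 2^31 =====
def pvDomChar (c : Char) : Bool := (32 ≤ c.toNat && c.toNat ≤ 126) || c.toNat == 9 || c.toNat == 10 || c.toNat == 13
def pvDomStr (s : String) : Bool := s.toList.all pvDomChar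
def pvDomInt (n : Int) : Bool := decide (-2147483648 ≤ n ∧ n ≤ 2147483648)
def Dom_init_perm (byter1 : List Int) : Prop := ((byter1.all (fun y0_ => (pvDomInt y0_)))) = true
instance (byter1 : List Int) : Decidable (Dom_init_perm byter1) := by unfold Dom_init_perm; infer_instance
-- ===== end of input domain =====

-- B replaces A's bin()-string / char-list pipeline by one big-integer accumulator with
-- shift-and-mask bit extraction (objective: alternative, same cost).

-- ===== PORT A =====

-- Python's `while len(byte)!=8: byte = "0"*(8-len(byte)) + byte`.
-- If the length is > 8 the Python loop never terminates (excluded by Pre_);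
-- the port returns the string unchanged there.
def padFix (byte : List Char) : List Char :=
  if byte.length = 8 then byte
  else if _h : byte.length < 8 then padFix (List.replicate (8 - byte.length) '0' ++ byte)
  else byte
termination_by 8 - byte.length
decreasing_by simp [List.length_append, List.length_replicate]; omega

def byter_to_list (byter : List Int) (as_byte : Bool) : List String :=
  -- bits.append(str(bin(num)))
  let bits : List (List Char) := byter.map (fun num => PySem.Int.toBinChars0b num)
  -- byte = bites[2:]; zero-pad to length 8
  let bitsfix : List (List Char) := bits.map (fun bites => padFix (bites.drop 2))
  if as_byte = false then
    (bitsfix.flatMap (fun byte => byte.map (fun bit => String.ofList [bit])))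
  else bitsfix.map String.ofList

def permSeqA : List Int :=
  [58, 50, 42, 34, 26, 18, 10, 2,
   60, 52, 44, 36, 28, 20, 12, 4,
   62, 54, 46, 38, 30, 22, 14, 6,
   64, 56, 48, 40, 32, 24, 16, 8,
   57, 49, 41, 33, 25, 17, 9, 1,
   59, 51, 43, 35, 27, 19, 11, 3,
   61, 53, 45, 37, 29, 21, 13, 5,
   63, 55, 47, 39, 31, 23, 15, 7]

def init_perm (byter1 : List Int) : List String :=
  let bitsfix := byter_to_list byter1 true
  -- PKCS5 padding branch
  let bitsfix' :=
    if bitsfix.length ≠ 8 then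
      let req_byts : Int := 8 - (bitsfix.length : Int)
      let pad0 : List Char := (PySem.Int.toBinChars0b req_byts).drop 2
      let pad : List Char :=
        if pad0.length ≠ 8 then List.replicate (8 - pad0.length) '0' ++ pad0 else pad0
      -- for i in range(req_byts): append pad  (range of a negative int is empty = toNat)
      bitsfix ++ List.replicate req_byts.toNat (String.ofList pad)
    else bitsfix
  let blocks : List String :=
    bitsfix'.flatMap (fun byte => byte.toList.map (fun bit => String.ofList [bit]))
  -- blocks[ind-1]; IndexError impossible: blocks always has ≥ 64 entries
  permSeqA.map (fun ind => (PySem.List.pyGet? blocks (ind - 1)).getD "")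

-- ===== PORT B =====

def permSeqB : List Int :=
  [58, 50, 42, 34, 26, 18, 10, 2,
   60, 52, 44, 36, 28, 20, 12, 4,
   62, 54, 46, 38, 30, 22, 14, 6,
   64, 56, 48, 40, 32, 24, 16, 8,
   57, 49, 41, 33, 25, 17, 9, 1,
   59, 51, 43, 35, 27, 19, 11, 3,
   61, 53, 45, 37, 29, 21, 13, 5,
   63, 55, 47, 39, 31, 23, 15, 7]

def init_perm_alt (byter1 : List Int) : List String :=
  let s := byter1.foldl (fun (p : Int × Int) num => (p.1 * 256 + num, p.2 + 8)) (0, 0)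
  let s' :=
    if (byter1.length : Int) ≠ 8 then
      let req : Int := 8 - (byter1.length : Int)
      (List.range req.toNat).foldl (fun (p : Int × Int) _ => (p.1 * 256 + req, p.2 + 8)) s
    else s
  -- str((block >> (nbits - ind)) & 1); nbits - ind ≥ 0 always (nbits ≥ 64)
  permSeqB.map (fun ind => PySem.Int.toStr (PySem.Int.band (s'.1 >>> (s'.2 - ind).toNat) 1))

-- ===== PRECONDITION & SPEC =====
-- Pre_ restricts to the natural byte domain 0..255: entries ≥ 256 or ≤ -128 make A's
-- zero-padding while loop run forever, and on entries -127..-1 A returns strings that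
-- contain bin()'s 'b' marker — an artefact outside the byte domain, which B does not mimic.
def Pre_init_perm (byter1 : List Int) : Prop := ∀ x ∈ byter1, 0 ≤ x ∧ x < 256
instance (byter1 : List Int) : Decidable (Pre_init_perm byter1) := by
  unfold Pre_init_perm; infer_instance

def pvWitness_init_perm : List Int := [1, 2, 3, 4, 5]

def Spec_init_perm (byter1 : List Int) (out : List String) : Prop := out = init_perm_alt byter1
instance (byter1 : List Int) (out : List String) : Decidable (Spec_init_perm byter1 out) := by unfold Spec_init_perm; infer_instance

-- ===== CLAIM (what is proved, stated in full; the proofs are below) =====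
def Claim_equal_init_perm : Prop := ∀ (byter1 : List Int), Dom_init_perm byter1 → Pre_init_perm byter1 → Spec_init_perm byter1 (init_perm byter1)

-- ===== LEMMAS AND PROOFS =====

-- the 8 bits of a byte n (MSB first), as characters
def byteStr (n : Nat) : List Char :=
  (List.range 8).map (fun j => if n / 2 ^ (7 - j) % 2 = 1 then '1' else '0')

-- the padded byte list both programs effectively work on
def paddedBytes (bs : List Int) : List Int :=
  if bs.length = 8 then bs
  else bs ++ List.replicate (8 - bs.length) (8 - (bs.length : Int))

def NB (bs : List Int) : List Nat := (paddedBytes bs).map Int.toNat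

-- the value both programs read their bits from
def valN : List Nat → Nat := List.foldl (fun b n => b * 256 + n) 0

-- the common normal form of both programs' output
def normal (bs : List Int) : List String :=
  permSeqA.map (fun ind =>
    if valN (NB bs) / 2 ^ (8 * (NB bs).length - ind.toNat) % 2 = 1 then "1" else "0")

theorem padFix_eq (byte : List Char) : padFix byte =
    if byte.length = 8 then byte
    else if byte.length < 8 then List.replicate (8 - byte.length) '0' ++ byte
    else byte := by
  rw [padFix]
  split_ifs with h1 h2 <;> try rfl
  rw [padFix]
  have : (List.replicate (8 - byte.length) '0' ++ byte).length = 8 := by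
    simp [List.length_append, List.length_replicate]; omega
  simp [this]

set_option maxRecDepth 100000 in
theorem padFix_byte : ∀ n : Nat, n < 256 →
    padFix ((PySem.Int.toBinChars0b (n : Int)).drop 2) = byteStr n := by
  intro n hn
  rw [padFix_eq]
  revert hn; revert n; decide

-- A's one-shot padding of the PKCS5 pad string gives the same 8 bits
set_option maxRecDepth 10000 in
theorem pad_byte : ∀ r : Nat, r < 9 → 1 ≤ r →
    (if ((PySem.Int.toBinChars0b (r : Int)).drop 2).length ≠ 8
     then List.replicate (8 - ((PySem.Int.toBinChars0b (r : Int)).drop 2).length) '0' ++ (PySem.Int.toBinChars0b (r : Int)).drop 2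
     else (PySem.Int.toBinChars0b (r : Int)).drop 2) = byteStr r := by decide

theorem permSeq_bounds : ∀ ind ∈ permSeqA, 1 ≤ ind ∧ ind ≤ 64 := by decide

theorem valN_foldl (bs : List Nat) : ∀ a : Nat,
    bs.foldl (fun b n => b * 256 + n) a = a * 256 ^ bs.length + valN bs := by
  induction bs with
  | nil => simp [valN]
  | cons n t ih =>
    intro a
    simp only [List.foldl_cons, List.length_cons, valN] at *
    rw [ih (a * 256 + n)]
    norm_num
    rw [ih n]
    ring

theorem valN_cons (n : Nat) (t : List Nat) : valN (n :: t) = n * 256 ^ t.length + valN t := by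
  simp only [valN, List.foldl_cons]
  have := valN_foldl t n
  simpa [valN] using this

theorem valN_lt (bs : List Nat) (h : ∀ n ∈ bs, n < 256) : valN bs < 256 ^ bs.length := by
  induction bs with
  | nil => simp [valN]
  | cons n t ih =>
    have hn : n < 256 := h n (by simp)
    have ht : valN t < 256 ^ t.length := ih (fun x hx => h x (by simp [hx]))
    rw [valN_cons]
    have h1 : n * 256 ^ t.length + valN t < (n + 1) * 256 ^ t.length := by
      have := Nat.add_lt_add_left ht (n * 256 ^ t.length)
      nlinarith
    calc n * 256 ^ t.length + valN t < (n + 1) * 256 ^ t.length := h1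
      _ ≤ 256 * 256 ^ t.length := Nat.mul_le_mul_right _ (by omega)
      _ = 256 ^ (n :: t).length := by rw [List.length_cons]; ring

theorem pow256 (L : Nat) : (256 : Nat) ^ L = 2 ^ (8 * L) := by
  rw [show (256 : Nat) = 2 ^ 8 from rfl, ← pow_mul]

-- bit k (from the left) of the concatenated bit string is bit (8·len − 1 − k) of the value
theorem bits_getElem : ∀ (bs : List Nat), (∀ n ∈ bs, n < 256) → ∀ k, k < 8 * bs.length →
    (bs.flatMap byteStr)[k]? =
      some (if valN bs / 2 ^ (8 * bs.length - 1 - k) % 2 = 1 then '1' else '0') := by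
  intro bs
  induction bs with
  | nil => intro _ k hk; simp at hk
  | cons n t ih =>
    intro h k hk
    have hn : n < 256 := h n (by simp)
    have ht : valN t < 256 ^ t.length := valN_lt t (fun x hx => h x (by simp [hx]))
    set L := t.length with hL
    have hval : valN (n :: t) = n * 2 ^ (8 * L) + valN t := by
      rw [valN_cons, pow256]
    have hr : valN t < 2 ^ (8 * L) := by rw [← pow256]; exact ht
    have hflat : (n :: t).flatMap byteStr = byteStr n ++ t.flatMap byteStr := by simp
    have hlen8 : (byteStr n).length = 8 := by simp [byteStr]
    rw [hflat]
    by_cases hk8 : k < 8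
    · rw [List.getElem?_append_left (by omega)]
      have hb : (byteStr n)[k]? = some (if n / 2 ^ (7 - k) % 2 = 1 then '1' else '0') := by
        simp [byteStr, hk8]
      rw [hb]
      have he : 8 * (n :: t).length - 1 - k = 8 * L + (7 - k) := by
        simp [List.length_cons]; omega
      rw [hval, he]
      have hdiv : (n * 2 ^ (8 * L) + valN t) / 2 ^ (8 * L + (7 - k)) = n / 2 ^ (7 - k) := by
        rw [pow_add, ← Nat.div_div_eq_div_mul]
        congr 1
        rw [Nat.add_comm, Nat.add_mul_div_right _ _ (Nat.pow_pos (by norm_num)),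
          Nat.div_eq_of_lt hr, Nat.zero_add]
      rw [hdiv]
    · rw [List.getElem?_append_right (by omega), hlen8]
      have hk' : k - 8 < 8 * L := by simp [List.length_cons] at hk; omega
      rw [ih (fun x hx => h x (by simp [hx])) (k - 8) hk']
      congr 2
      have he : 8 * L - 1 - (k - 8) = 8 * (n :: t).length - 1 - k := by
        simp [List.length_cons]; omega
      rw [he]
      set e := 8 * (n :: t).length - 1 - k with hedef
      have he1 : e + 1 ≤ 8 * L := by simp [hedef, List.length_cons]; omega
      rw [hval]
      have hle : e ≤ 8 * L := by omega
      have hx : n * 2 ^ (8 * L) + valN t = valN t + (n * 2 ^ (8 * L - e)) * 2 ^ e := by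
        rw [Nat.mul_assoc, ← pow_add, Nat.sub_add_cancel hle, Nat.add_comm]
      rw [hx, Nat.add_mul_div_right _ _ (Nat.pow_pos (by norm_num))]
      have : n * 2 ^ (8 * L - e) = (n * 2 ^ (8 * L - e - 1)) * 2 := by
        rw [Nat.mul_assoc, ← pow_succ]
        congr 2
        omega
      rw [this, Nat.add_mul_mod_self_right]

theorem NB_lt (bs : List Int) (h : Pre_init_perm bs) : ∀ n ∈ NB bs, n < 256 := by
  intro n hn
  simp only [NB, paddedBytes] at hn
  split_ifs at hn with h8
  · obtain ⟨x, hx, rfl⟩ := List.mem_map.mp hn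
    have := h x hx; omega
  · obtain ⟨x, hx, rfl⟩ := List.mem_map.mp hn
    rcases List.mem_append.mp hx with hx | hx
    · have := h x hx; omega
    · have := List.eq_of_mem_replicate hx
      subst this; omega

theorem NB_len (bs : List Int) : 8 ≤ (NB bs).length := by
  simp only [NB, paddedBytes, List.length_map]
  split_ifs with h8
  · omega
  · simp [List.length_append, List.length_replicate]; omega

-- ===== A reduces to the normal form =====
theorem A_reduce (bs : List Int) (h : Pre_init_perm bs) : init_perm bs = normal bs := by
  have hbf : byter_to_list bs true = bs.map (fun n => String.ofList (byteStr n.toNat)) := by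
    simp only [byter_to_list, List.map_map, if_neg (by decide : ¬(true = false))]
    apply List.map_congr_left
    intro x hx
    obtain ⟨hx0, hx256⟩ := h x hx
    have hxe : x = ((x.toNat : Nat) : Int) := (Int.toNat_of_nonneg hx0).symm
    simp only [Function.comp]
    rw [hxe, padFix_byte x.toNat (by omega), Int.toNat_natCast]
  have hbf' : (if (byter_to_list bs true).length ≠ 8 then
        byter_to_list bs true ++
          List.replicate ((8 : Int) - ((byter_to_list bs true).length : Int)).toNat
            (String.ofList
              (if ((PySem.Int.toBinChars0b ((8 : Int) - ((byter_to_list bs true).length : Int))).drop 2).length ≠ 8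
               then List.replicate (8 - ((PySem.Int.toBinChars0b ((8 : Int) - ((byter_to_list bs true).length : Int))).drop 2).length) '0' ++
                 (PySem.Int.toBinChars0b ((8 : Int) - ((byter_to_list bs true).length : Int))).drop 2
               else (PySem.Int.toBinChars0b ((8 : Int) - ((byter_to_list bs true).length : Int))).drop 2))
      else byter_to_list bs true) =
      (paddedBytes bs).map (fun n => String.ofList (byteStr n.toNat)) := by
    have hlen : (byter_to_list bs true).length = bs.length := by rw [hbf]; simp
    by_cases h8 : bs.length = 8
    · rw [if_neg (by simp [hlen, h8]), hbf]
      simp [paddedBytes, h8]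
    · rw [if_pos (by simp [hlen, h8]), hbf]
      simp only [List.length_map]
      simp only [paddedBytes]
      rw [if_neg h8, List.map_append, List.map_replicate]
      by_cases hlt : bs.length < 8
      · have hr9 : 8 - bs.length < 9 := by omega
        have hr1 : 1 ≤ 8 - bs.length := by omega
        have hc : (8 : Int) - (bs.length : Int) = ((8 - bs.length : Nat) : Int) := by
          omega
        rw [hc, pad_byte (8 - bs.length) hr9 hr1, Int.toNat_natCast]
      · have h0 : ((8 : Int) - (bs.length : Int)).toNat = 0 := by omega
        have h0' : 8 - bs.length = 0 := by omega
        rw [h0, h0']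
        simp
  have hblocks : ((if (byter_to_list bs true).length ≠ 8 then
        byter_to_list bs true ++
          List.replicate ((8 : Int) - ((byter_to_list bs true).length : Int)).toNat
            (String.ofList
              (if ((PySem.Int.toBinChars0b ((8 : Int) - ((byter_to_list bs true).length : Int))).drop 2).length ≠ 8
               then List.replicate (8 - ((PySem.Int.toBinChars0b ((8 : Int) - ((byter_to_list bs true).length : Int))).drop 2).length) '0' ++
                 (PySem.Int.toBinChars0b ((8 : Int) - ((byter_to_list bs true).length : Int))).drop 2
               else (PySem.Int.toBinChars0b ((8 : Int) - ((byter_to_list bs true).length : Int))).drop 2))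
      else byter_to_list bs true).flatMap
        (fun byte => byte.toList.map (fun bit => String.ofList [bit]))) =
      ((NB bs).flatMap byteStr).map (fun c => String.ofList [c]) := by
    rw [hbf']
    simp [NB, List.flatMap_map, List.map_flatMap]
  simp only [init_perm, normal]
  rw [hblocks]
  apply List.map_congr_left
  intro ind hind
  obtain ⟨h1, h64⟩ := permSeq_bounds ind hind
  have hm8 : 8 ≤ (NB bs).length := NB_len bs
  have hnlt : ∀ n ∈ NB bs, n < 256 := NB_lt bs h
  have hk : (ind - 1 : Int) = (((ind - 1).toNat : Nat) : Int) := by omega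
  have hklt : (ind - 1).toNat < 8 * (NB bs).length := by omega
  rw [hk]
  rw [show PySem.List.pyGet? (((NB bs).flatMap byteStr).map (fun c => String.ofList [c]))
        (((ind - 1).toNat : Nat) : Int) =
      (((NB bs).flatMap byteStr).map (fun c => String.ofList [c]))[(ind - 1).toNat]? by
    simp [pysem]]
  rw [List.getElem?_map, bits_getElem (NB bs) hnlt ((ind - 1).toNat) hklt]
  have he : 8 * (NB bs).length - 1 - (ind - 1).toNat = 8 * (NB bs).length - ind.toNat := by
    omega
  rw [he]
  rcases Nat.mod_two_eq_zero_or_one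
      (valN (NB bs) / 2 ^ (8 * (NB bs).length - ind.toNat)) with h0 | h0 <;>
    simp [h0]

theorem valN_append (u w : List Nat) : valN (u ++ w) = valN u * 256 ^ w.length + valN w := by
  simp only [valN, List.foldl_append]
  exact valN_foldl w (List.foldl (fun b n => b * 256 + n) 0 u)

theorem foldB (t : List Int) (ht : ∀ x ∈ t, 0 ≤ x) : ∀ a c : Int,
    t.foldl (fun (p : Int × Int) n => (p.1 * 256 + n, p.2 + 8)) (a, c) =
      (a * 256 ^ t.length + ((valN (t.map Int.toNat) : Nat) : Int), c + 8 * t.length) := by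
  induction t with
  | nil => intro a c; simp [valN]
  | cons n t ih =>
    intro a c
    simp only [List.foldl_cons]
    rw [ih (fun x hx => ht x (by simp [hx])) (a * 256 + n) (c + 8)]
    have hmap : (n :: t).map Int.toNat = n.toNat :: t.map Int.toNat := by simp
    rw [hmap, valN_cons]
    have hn : ((n.toNat : Nat) : Int) = n := Int.toNat_of_nonneg (ht n (by simp))
    push_cast
    rw [hn]
    simp only [Prod.mk.injEq, List.length_cons, List.length_map]
    constructor <;> (try push_cast) <;> ring

theorem foldRange (r : Nat) (x a c : Int) :
    (List.range r).foldl (fun (p : Int × Int) _ => (p.1 * 256 + x, p.2 + 8)) (a, c) =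
      (List.replicate r x).foldl (fun (p : Int × Int) n => (p.1 * 256 + n, p.2 + 8)) (a, c) := by
  induction r with
  | zero => rfl
  | succ r ih =>
    rw [List.range_succ, List.replicate_succ' , List.foldl_append, List.foldl_append, ih]
    simp

-- ===== B reduces to the normal form =====
theorem B_reduce (bs : List Int) (h : Pre_init_perm bs) : init_perm_alt bs = normal bs := by
  have hnn : ∀ x ∈ bs, 0 ≤ x := fun x hx => (h x hx).1
  have hs : bs.foldl (fun (p : Int × Int) n => (p.1 * 256 + n, p.2 + 8)) (0, 0) =
      (((valN (bs.map Int.toNat) : Nat) : Int), 8 * (bs.length : Int)) := by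
    rw [foldB bs hnn 0 0]; simp
  have hs' : (if (bs.length : Int) ≠ 8 then
        (List.range ((8 : Int) - (bs.length : Int)).toNat).foldl
          (fun (p : Int × Int) _ => (p.1 * 256 + ((8 : Int) - (bs.length : Int)), p.2 + 8))
          (bs.foldl (fun (p : Int × Int) n => (p.1 * 256 + n, p.2 + 8)) (0, 0))
      else bs.foldl (fun (p : Int × Int) n => (p.1 * 256 + n, p.2 + 8)) (0, 0)) =
      (((valN (NB bs) : Nat) : Int), 8 * ((NB bs).length : Int)) := by
    by_cases h8 : bs.length = 8
    · simp only [h8]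
      norm_num
      rw [hs]
      simp [NB, paddedBytes, h8]
    · have hne : (bs.length : Int) ≠ 8 := by exact_mod_cast h8
      rw [if_pos hne, hs, foldRange, foldB _ (by
        intro x hx
        have hxe := List.eq_of_mem_replicate hx
        have hne0 : ((8 : Int) - (bs.length : Int)).toNat ≠ 0 := by
          intro h0
          rw [h0] at hx
          simp at hx
        omega)]
      by_cases hlt : bs.length < 8
      · have h1 : ((8 : Int) - (bs.length : Int)).toNat = 8 - bs.length := by omega
        have h2 : ((8 : Int) - (bs.length : Int)) = ((8 - bs.length : Nat) : Int) := by
          omega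
        rw [h1]
        simp only [NB, paddedBytes]
        rw [if_neg h8, List.map_append, valN_append]
        simp only [List.map_replicate, List.length_replicate, List.length_append,
          List.length_map, h1, Prod.mk.injEq]
        constructor <;> (try push_cast) <;> ring
      · have h1 : ((8 : Int) - (bs.length : Int)).toNat = 0 := by omega
        have h2 : 8 - bs.length = 0 := by omega
        rw [h1]
        simp only [NB, paddedBytes, h2, List.replicate_zero]
        rw [if_neg h8]
        simp
  simp only [init_perm_alt, normal]
  rw [show permSeqB = permSeqA from rfl, hs']
  apply List.map_congr_left
  intro ind hind
  obtain ⟨h1, h64⟩ := permSeq_bounds ind hind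
  have hm8 : 8 ≤ (NB bs).length := NB_len bs
  simp only []
  have hk : (8 * ((NB bs).length : Int) - ind).toNat = 8 * (NB bs).length - ind.toNat := by
    omega
  rw [hk]
  rw [show ((valN (NB bs) : Nat) : Int) >>> (8 * (NB bs).length - ind.toNat) =
      ((valN (NB bs) >>> (8 * (NB bs).length - ind.toNat) : Nat) : Int) by simp]
  have hx : PySem.Int.band ((valN (NB bs) >>> (8 * (NB bs).length - ind.toNat) : Nat) : Int) 1 =
      (((valN (NB bs) / 2 ^ (8 * (NB bs).length - ind.toNat)) % 2 : Nat) : Int) := by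
    have := PySem.Int.band_natCast (valN (NB bs) >>> (8 * (NB bs).length - ind.toNat)) 1
    simpa [Nat.and_one_is_mod, Nat.shiftRight_eq_div_pow] using this
  rw [hx]
  rcases Nat.mod_two_eq_zero_or_one (valN (NB bs) / 2 ^ (8 * (NB bs).length - ind.toNat)) with h0 | h0 <;>
    rw [h0] <;> simp <;> decide

-- ===== VERDICT (by name: the statement is the Claim_ definition above) =====
theorem init_perm_spec : Claim_equal_init_perm := by
  intro bs _ hpre
  unfold Spec_init_perm
  rw [A_reduce bs hpre, B_reduce bs hpre]
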